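-- pv_equiv track=rewrite | github.com/511615/quantities | tests/webapi/test_workbench_api.py | _infer_feature_scope_modality
-- ===== SOURCE A (Python) =====
-- def _infer_feature_scope_modality(feature_names: list[str]) -> str:
--     normalized = [name.strip().lower() for name in feature_names if name.strip()]
--     if not normalized:
--         return "market"
--     if all(name.startswith("macro_") for name in normalized):
--         return "macro"
--     if all(name.startswith("on_chain_") for name in normalized):
--         return "on_chain"
--     if all(name.startswith("derivatives_") for name in normalized):
--         return "derivatives"
--     nlp_prefixes = ("text_", "news_", "sentiment_")
--     nlp_exact = {
--         "news_event_count",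
--         "news_mention_count",
--         "news_source_count",
--         "sentiment_score",
--         "text_event_intensity",
--     }
--     if all(name.startswith(nlp_prefixes) or name in nlp_exact for name in normalized):
--         return "nlp"
--     return "market"
-- ===== SOURCE B (Python) =====
-- def _infer_feature_scope_modality(feature_names: list[str]) -> str:
--     nlp_prefixes = ("text_", "news_", "sentiment_")
--     nlp_exact = {
--         "news_event_count",
--         "news_mention_count",
--         "news_source_count",
--         "sentiment_score",
--         "text_event_intensity",
--     }
--
--     def classify(name: str) -> str:
--         if name.startswith("macro_"):
--             return "macro"
--         if name.startswith("on_chain_"):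
--             return "on_chain"
--         if name.startswith("derivatives_"):
--             return "derivatives"
--         if name.startswith(nlp_prefixes) or name in nlp_exact:
--             return "nlp"
--         return "other"
--
--     label = None
--     for raw in feature_names:
--         name = raw.strip().lower()
--         if not name:
--             continue
--         cat = classify(name)
--         if label is None:
--             label = cat
--         elif cat != label:
--             label = "other"
--     return label if label is not None and label != "other" else "market"
-- ===== Notes on version B (the rewrite author's own statement) =====
-- stated objective: alternative
-- what changed: B replaces A's four separate all()-passes over a materialized normalized list by a single pass that labels each normalized name with a small classifier and folds the labels into one agreed label (collapsing disagreement to 'other'), returning that label unless it is absent or 'other'.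
import Mathlib
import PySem

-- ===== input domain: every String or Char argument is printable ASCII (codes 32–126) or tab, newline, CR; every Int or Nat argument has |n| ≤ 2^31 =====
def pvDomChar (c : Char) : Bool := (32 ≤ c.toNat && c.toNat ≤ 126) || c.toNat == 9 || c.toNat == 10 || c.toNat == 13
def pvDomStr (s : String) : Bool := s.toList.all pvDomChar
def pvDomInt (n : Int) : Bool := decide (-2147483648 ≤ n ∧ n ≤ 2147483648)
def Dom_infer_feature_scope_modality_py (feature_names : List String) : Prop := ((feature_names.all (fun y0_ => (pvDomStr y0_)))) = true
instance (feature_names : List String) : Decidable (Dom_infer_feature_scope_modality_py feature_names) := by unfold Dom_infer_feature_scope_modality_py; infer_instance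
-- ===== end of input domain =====

-- B replaces A's four all()-passes over a materialized normalized list by a single fold that
-- classifies each name and collapses disagreeing labels; equivalence is proved on the whole domain.

-- nlp membership test (prefix tuple + exact set), verbatim the same expression in both Pythons
def pvNlpOk (name : String) : Bool :=
  (PySem.Str.startswith name "text_" || PySem.Str.startswith name "news_" ||
   PySem.Str.startswith name "sentiment_")
  || PySem.Set.contains (PySem.Set.ofList
      ["news_event_count", "news_mention_count", "news_source_count",
       "sentiment_score", "text_event_intensity"]) name

-- ===== PORT A =====
def infer_feature_scope_modality_py (feature_names : List String) : String :=
  let normalized :=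
    (feature_names.filter (fun name => !(PySem.Str.strip name == ""))).map
      (fun name => PySem.Str.lower (PySem.Str.strip name))
  if normalized = [] then "market"
  else if normalized.all (fun name => PySem.Str.startswith name "macro_") then "macro"
  else if normalized.all (fun name => PySem.Str.startswith name "on_chain_") then "on_chain"
  else if normalized.all (fun name => PySem.Str.startswith name "derivatives_") then "derivatives"
  else if normalized.all (fun name => pvNlpOk name) then "nlp"
  else "market"

-- ===== PORT B =====
def pvClassify (name : String) : String :=
  if PySem.Str.startswith name "macro_" then "macro"
  else if PySem.Str.startswith name "on_chain_" then "on_chain"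
  else if PySem.Str.startswith name "derivatives_" then "derivatives"
  else if pvNlpOk name then "nlp"
  else "other"

def pvStep (label : Option String) (raw : String) : Option String :=
  let name := PySem.Str.lower (PySem.Str.strip raw)
  if name = "" then label
  else
    match label with
    | none => some (pvClassify name)
    | some l => if pvClassify name ≠ l then some "other" else some l

def infer_feature_scope_modality_py_alt (feature_names : List String) : String :=
  match feature_names.foldl pvStep none with
  | some l => if l ≠ "other" then l else "market"
  | none => "market"

-- ===== PRECONDITION & SPEC =====
def Spec_infer_feature_scope_modality_py (feature_names : List String) (out : String) : Prop := out = infer_feature_scope_modality_py_alt feature_names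
instance (feature_names : List String) (out : String) : Decidable (Spec_infer_feature_scope_modality_py feature_names out) := by unfold Spec_infer_feature_scope_modality_py; infer_instance

-- ===== CLAIM (what is proved, stated in full; the proofs are below) =====
def Claim_equal_infer_feature_scope_modality_py : Prop := ∀ (feature_names : List String), Dom_infer_feature_scope_modality_py feature_names → Spec_infer_feature_scope_modality_py feature_names (infer_feature_scope_modality_py feature_names)

-- ===== LEMMAS AND PROOFS =====

theorem pvHeadOfPrefix {p s : List Char} {a : Char} (h : p <+: s) (hp : p.head? = some a) :
    s.head? = some a := by
  obtain ⟨u, rfl⟩ := h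
  rw [List.head?_append, hp]; rfl

-- two candidate prefixes with different first characters exclude each other
theorem pvSwExcl (s p q : String) (a b : Char) (pa : p.toList.head? = some a)
    (qb : q.toList.head? = some b) (hab : a ≠ b)
    (h : PySem.Str.startswith s p = true) : PySem.Str.startswith s q = false := by
  rw [Bool.eq_false_iff]
  intro h2
  rw [PySem.Str.startswith_eq, PySem.Chars.startswith_iff] at h h2
  have h1 := pvHeadOfPrefix h pa
  have h3 := pvHeadOfPrefix h2 qb
  rw [h1] at h3
  exact hab (Option.some.inj h3)

theorem pvNlpExcl (s : String) (h : pvNlpOk s = true) :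
    PySem.Str.startswith s "macro_" = false ∧ PySem.Str.startswith s "on_chain_" = false ∧
    PySem.Str.startswith s "derivatives_" = false := by
  unfold pvNlpOk at h
  simp only [Bool.or_eq_true] at h
  rcases h with ((h|h)|h)|h
  · exact ⟨pvSwExcl s _ _ 't' 'm' rfl rfl (by decide) h,
      pvSwExcl s _ _ 't' 'o' rfl rfl (by decide) h,
      pvSwExcl s _ _ 't' 'd' rfl rfl (by decide) h⟩
  · exact ⟨pvSwExcl s _ _ 'n' 'm' rfl rfl (by decide) h,
      pvSwExcl s _ _ 'n' 'o' rfl rfl (by decide) h,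
      pvSwExcl s _ _ 'n' 'd' rfl rfl (by decide) h⟩
  · exact ⟨pvSwExcl s _ _ 's' 'm' rfl rfl (by decide) h,
      pvSwExcl s _ _ 's' 'o' rfl rfl (by decide) h,
      pvSwExcl s _ _ 's' 'd' rfl rfl (by decide) h⟩
  · simp only [PySem.Set.contains] at h
    simp at h
    rcases h with h|h|h|h|h <;> subst h <;> exact ⟨by decide, by decide, by decide⟩

theorem pvClsMacro (n : String) :
    pvClassify n = "macro" ↔ PySem.Str.startswith n "macro_" = true := by
  unfold pvClassify; split_ifs <;> simp_all

theorem pvClsOnChain (n : String) :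
    pvClassify n = "on_chain" ↔ PySem.Str.startswith n "on_chain_" = true := by
  unfold pvClassify
  split_ifs with h1 h2 h3 h4
  · have := pvSwExcl n "macro_" "on_chain_" 'm' 'o' rfl rfl (by decide) h1
    simp_all
  all_goals simp_all

theorem pvClsDeriv (n : String) :
    pvClassify n = "derivatives" ↔ PySem.Str.startswith n "derivatives_" = true := by
  unfold pvClassify
  split_ifs with h1 h2 h3 h4
  · have := pvSwExcl n "macro_" "derivatives_" 'm' 'd' rfl rfl (by decide) h1
    simp_all
  · have := pvSwExcl n "on_chain_" "derivatives_" 'o' 'd' rfl rfl (by decide) h2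
    simp_all
  all_goals simp_all

theorem pvClsNlp (n : String) : pvClassify n = "nlp" ↔ pvNlpOk n = true := by
  unfold pvClassify
  split_ifs with h1 h2 h3 h4
  · by_cases hn : pvNlpOk n = true
    · have := (pvNlpExcl n hn).1; simp_all
    · simp_all
  · by_cases hn : pvNlpOk n = true
    · have := (pvNlpExcl n hn).2.1; simp_all
    · simp_all
  · by_cases hn : pvNlpOk n = true
    · have := (pvNlpExcl n hn).2.2; simp_all
    · simp_all
  all_goals simp_all

theorem pvClsCases (n : String) :
    pvClassify n = "macro" ∨ pvClassify n = "on_chain" ∨ pvClassify n = "derivatives" ∨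
    pvClassify n = "nlp" ∨ pvClassify n = "other" := by
  unfold pvClassify; split_ifs <;> simp

theorem pvLowerEmpty (s : String) : PySem.Str.lower s = "" ↔ s = "" := by
  constructor
  · intro h
    have := congrArg String.toList h
    simp [PySem.Str.toList_lower, PySem.Chars.lower] at this
    exact this
  · rintro rfl; rfl

-- the normalized-name step of B's fold
def pvG (label : Option String) (name : String) : Option String :=
  match label with
  | none => some (pvClassify name)
  | some l => if pvClassify name ≠ l then some "other" else some l

theorem pvFoldNorm (names : List String) (acc : Option String) :
    names.foldl pvStep acc =
      ((names.filter (fun name => !(PySem.Str.strip name == ""))).map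
        (fun name => PySem.Str.lower (PySem.Str.strip name))).foldl pvG acc := by
  induction names generalizing acc with
  | nil => simp
  | cons raw t ih =>
    rw [List.foldl_cons, List.filter_cons]
    by_cases he : PySem.Str.strip raw = ""
    · have hlow : PySem.Str.lower (PySem.Str.strip raw) = "" := by rw [he]; rfl
      have hstep : pvStep acc raw = acc := by
        simp only [pvStep, hlow]
        rfl
      rw [hstep, if_neg (by simp [he])]
      exact ih acc
    · have hm : PySem.Str.lower (PySem.Str.strip raw) ≠ "" := fun h => he ((pvLowerEmpty _).mp h)
      have hstep : pvStep acc raw = pvG acc (PySem.Str.lower (PySem.Str.strip raw)) := by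
        simp only [pvStep, pvG, if_neg hm]
      rw [hstep, if_pos (by simp [he]), List.map_cons, List.foldl_cons]
      exact ih _

theorem pvFoldG (t : List String) (l : String) :
    t.foldl pvG (some l) = some (if t.all (fun n => pvClassify n == l) then l else "other") := by
  induction t generalizing l with
  | nil => simp
  | cons n t ih =>
    rw [List.foldl_cons]
    by_cases hc : pvClassify n = l
    · have hg : pvG (some l) n = some l := by simp [pvG, hc]
      rw [hg, ih l]
      simp [List.all_cons, hc]
    · have hg : pvG (some l) n = some "other" := by simp [pvG, hc]
      rw [hg, ih "other"]
      simp [List.all_cons, hc]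

-- ===== VERDICT (by name: the statement is the Claim_ definition above) =====
theorem infer_feature_scope_modality_py_spec : Claim_equal_infer_feature_scope_modality_py := by
  intro names _
  unfold Spec_infer_feature_scope_modality_py infer_feature_scope_modality_py
    infer_feature_scope_modality_py_alt
  rw [pvFoldNorm]
  set N := ((names.filter (fun name => !(PySem.Str.strip name == ""))).map
      (fun name => PySem.Str.lower (PySem.Str.strip name))) with hN
  clear_value N
  match N with
  | [] => rfl
  | n :: t =>
    simp only [List.foldl_cons, pvG, pvFoldG]
    have hcons : (n :: t) = ([] : List String) ↔ False := by simp
    rw [if_neg (by simp)]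
    by_cases h1 : (n :: t).all (fun name => PySem.Str.startswith name "macro_") = true
    · have hall : ∀ m ∈ n :: t, pvClassify m = "macro" := by
        intro m hm; exact (pvClsMacro m).mpr (by
          have := List.all_eq_true.mp h1 m hm; simpa using this)
      rw [if_pos (by simpa using h1)]
      have hn := hall n (by simp)
      have ht : t.all (fun m => pvClassify m == "macro") = true := by
        simp only [List.all_eq_true]
        intro m hm; simp [hall m (List.mem_cons_of_mem _ hm)]
      rw [hn, if_pos ht]
      decide
    · rw [if_neg (by simpa using h1)]
      by_cases h2 : (n :: t).all (fun name => PySem.Str.startswith name "on_chain_") = true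
      · have hall : ∀ m ∈ n :: t, pvClassify m = "on_chain" := by
          intro m hm; exact (pvClsOnChain m).mpr (by
            have := List.all_eq_true.mp h2 m hm; simpa using this)
        rw [if_pos (by simpa using h2)]
        have hn := hall n (by simp)
        have ht : t.all (fun m => pvClassify m == "on_chain") = true := by
          simp only [List.all_eq_true]
          intro m hm; simp [hall m (List.mem_cons_of_mem _ hm)]
        rw [hn, if_pos ht]
        decide
      · rw [if_neg (by simpa using h2)]
        by_cases h3 : (n :: t).all (fun name => PySem.Str.startswith name "derivatives_") = true
        · have hall : ∀ m ∈ n :: t, pvClassify m = "derivatives" := by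
            intro m hm; exact (pvClsDeriv m).mpr (by
              have := List.all_eq_true.mp h3 m hm; simpa using this)
          rw [if_pos (by simpa using h3)]
          have hn := hall n (by simp)
          have ht : t.all (fun m => pvClassify m == "derivatives") = true := by
            simp only [List.all_eq_true]
            intro m hm; simp [hall m (List.mem_cons_of_mem _ hm)]
          rw [hn, if_pos ht]
          decide
        · rw [if_neg (by simpa using h3)]
          by_cases h4 : (n :: t).all (fun name => pvNlpOk name) = true
          · have hall : ∀ m ∈ n :: t, pvClassify m = "nlp" := by
              intro m hm; exact (pvClsNlp m).mpr (by
                have := List.all_eq_true.mp h4 m hm; simpa using this)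
            rw [if_pos (by simpa using h4)]
            have hn := hall n (by simp)
            have ht : t.all (fun m => pvClassify m == "nlp") = true := by
              simp only [List.all_eq_true]
              intro m hm; simp [hall m (List.mem_cons_of_mem _ hm)]
            rw [hn, if_pos ht]
            decide
          · rw [if_neg (by simpa using h4)]
            -- B must give "market": otherwise all classify to one non-"other" label
            by_cases ht : t.all (fun m => pvClassify m == pvClassify n) = true
            · have hall : ∀ m ∈ n :: t, pvClassify m = pvClassify n := by
                intro m hm
                rcases List.mem_cons.mp hm with rfl | hm
                · rfl
                · have := List.all_eq_true.mp ht m hm; simpa using this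
              rw [if_pos ht]
              rcases pvClsCases n with hc|hc|hc|hc|hc
              · exact absurd (List.all_eq_true.mpr (fun m hm => by
                  simpa using (pvClsMacro m).mp (by rw [hall m hm, hc]))) h1
              · exact absurd (List.all_eq_true.mpr (fun m hm => by
                  simpa using (pvClsOnChain m).mp (by rw [hall m hm, hc]))) h2
              · exact absurd (List.all_eq_true.mpr (fun m hm => by
                  simpa using (pvClsDeriv m).mp (by rw [hall m hm, hc]))) h3
              · exact absurd (List.all_eq_true.mpr (fun m hm => by
                  simpa using (pvClsNlp m).mp (by rw [hall m hm, hc]))) h4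
              · rw [hc]; decide
            · rw [if_neg ht]; decide
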